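-- pv_equiv track=rewrite | github.com/TheSonGori/UTFSM---IWI131 | TAREA 6/Tarea_6.py | notreplace
-- ===== SOURCE A (Python) =====
-- def notreplace(emoji, significado, texto): #Esta Funcion busca replicar lo que hace la funcion .replace()
--     texto_cambiado = ""
--     i = 0
--     mayuscula = significado.upper()
--
--     while i < len(texto):
--         if emoji == texto[i : i + len(emoji)]:
--             texto_cambiado += mayuscula
--             i += len(emoji)
--         else:
--             texto_cambiado += texto[i]
--             i += 1
--     return texto_cambiado
-- ===== SOURCE B (Python) =====
-- def notreplace(emoji, significado, texto):
--     mayuscula = significado.upper()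
--     partes = []
--     start = 0
--     while True:
--         idx = texto.find(emoji, start)
--         if idx == -1:
--             partes.append(texto[start:])
--             break
--         partes.append(texto[start:idx])
--         partes.append(mayuscula)
--         start = idx + len(emoji)
--     return "".join(partes)
-- ===== Notes on version B (the rewrite author's own statement) =====
-- stated objective: faster
-- what changed: Replaces A's per-character scan that re-slices and compares the emoji at every position with a find-based jump scan: locate each occurrence with str.find, copy the untouched stretch between matches as one slice, and join the parts at the end instead of repeated string concatenation.
-- outside the precondition, e.g. on notreplace('', 'x', ''): A returns '', B does not finish within the time limit
import Mathlib
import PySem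

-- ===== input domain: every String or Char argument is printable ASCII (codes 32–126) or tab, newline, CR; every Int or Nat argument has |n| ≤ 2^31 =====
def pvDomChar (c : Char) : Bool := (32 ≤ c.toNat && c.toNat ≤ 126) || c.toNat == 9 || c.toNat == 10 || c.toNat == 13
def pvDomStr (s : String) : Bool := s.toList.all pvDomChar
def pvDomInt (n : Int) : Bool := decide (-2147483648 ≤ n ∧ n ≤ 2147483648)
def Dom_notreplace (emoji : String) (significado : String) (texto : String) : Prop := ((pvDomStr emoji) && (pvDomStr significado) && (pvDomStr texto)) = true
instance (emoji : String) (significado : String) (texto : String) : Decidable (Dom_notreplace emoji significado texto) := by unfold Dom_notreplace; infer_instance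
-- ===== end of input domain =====

-- B replaces A's per-character scan (slice-compare at every index, char-by-char copy)
-- with a find-based jump scan that copies whole stretches between occurrences; objective: faster (constant-factor).
-- On empty emoji both Pythons loop forever (find('',start)=start keeps start fixed); those inputs are outside Pre_.

-- ===== PORT A =====
-- while loop of A: fuel counts remaining permitted iterations; with emoji ≠ [] the loop
-- performs at most texto.length iterations, so fuel texto.length+1 is never exhausted
-- (fuel = 0 only happens after i ≥ length, where returning acc is what A returns).
def pvLoopA (e mayus t : List Char) : Nat → Nat → List Char → List Char
  | 0, _, acc => acc
  | f + 1, i, acc =>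
    if i < t.length then
      if e = PySem.List.slice t (some (i : Int)) (some ((i : Int) + (e.length : Int))) then
        pvLoopA e mayus t f (i + e.length) (acc ++ mayus)
      else
        pvLoopA e mayus t f (i + 1) (acc ++ (t.drop i).take 1)   -- texto[i], exact for 0 ≤ i < len
    else acc

def notreplace (emoji : String) (significado : String) (texto : String) : String :=
  String.ofList (pvLoopA emoji.toList (PySem.Chars.upper significado.toList) texto.toList
    (texto.toList.length + 1) 0 [])

-- ===== PORT B =====
-- while True loop of Source B: idx = texto.find(emoji, start); the parts list is kept joined in acc.
-- Same fuel guard: with emoji ≠ [] each non-final iteration advances start by ≥ 1.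
def pvLoopB (e mayus t : List Char) : Nat → Nat → List Char → List Char
  | 0, _, acc => acc
  | f + 1, start, acc =>
    let idx := PySem.Chars.findFrom t e (start : Int) none
    if idx = -1 then acc ++ t.drop start                          -- texto[start:]
    else pvLoopB e mayus t f (idx.toNat + e.length)
      (acc ++ (t.drop start).take (idx.toNat - start) ++ mayus)   -- texto[start:idx] + mayuscula

def notreplace_alt (emoji : String) (significado : String) (texto : String) : String :=
  String.ofList (pvLoopB emoji.toList (PySem.Chars.upper significado.toList) texto.toList
    (texto.toList.length + 2) 0 [])

-- ===== PRECONDITION & SPEC =====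
-- Pre_ excludes only emoji = "": there Python A loops forever whenever texto is nonempty, and
-- Python B's find-loop loops forever for every texto (find('', start) = start never advances),
-- so neither program returns on that region except A on the single point texto = "".
def Pre_notreplace (emoji : String) (significado : String) (texto : String) : Prop := emoji ≠ ""
instance (emoji : String) (significado : String) (texto : String) : Decidable (Pre_notreplace emoji significado texto) := by unfold Pre_notreplace; infer_instance
def pvWitness_notreplace : String × String × String := ("a", "hi", "bab a")
def Spec_notreplace (emoji : String) (significado : String) (texto : String) (out : String) : Prop := out = notreplace_alt emoji significado texto
instance (emoji : String) (significado : String) (texto : String) (out : String) : Decidable (Spec_notreplace emoji significado texto out) := by unfold Spec_notreplace; infer_instance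

-- ===== CLAIM (what is proved, stated in full; the proofs are below) =====
def Claim_equal_notreplace : Prop := ∀ (emoji : String) (significado : String) (texto : String), Dom_notreplace emoji significado texto → Pre_notreplace emoji significado texto → Spec_notreplace emoji significado texto (notreplace emoji significado texto)

-- ===== LEMMAS AND PROOFS =====

-- A's slice test at index i is the prefix test on t.drop i.
lemma pvMatch_iff (e t : List Char) (i : Nat) :
    (e = PySem.List.slice t (some (i : Int)) (some ((i : Int) + (e.length : Int)))) ↔ e <+: t.drop i := by
  rw [PySem.List.slice_natCast_add, List.prefix_iff_eq_take]

-- When no occurrence of e lies at or after start, A copies the tail char by char.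
lemma pvLoopA_none (e mayus t : List Char) :
    ∀ f start acc, (∀ j, start ≤ j → ¬ e <+: t.drop j) → t.length ≤ start + f →
      pvLoopA e mayus t f start acc = acc ++ t.drop start := by
  intro f
  induction f with
  | zero =>
    intro start acc _ hf
    rw [pvLoopA, List.drop_eq_nil_of_le (show t.length ≤ start by omega), List.append_nil]
  | succ f ih =>
    intro start acc hno hf
    rw [pvLoopA]
    split
    · rw [if_neg (by rw [pvMatch_iff]; exact hno start le_rfl)]
      rw [ih (start + 1) _ (fun j hj => hno j (by omega)) (by omega)]
      have hsplit : t.drop start = (t.drop start).take 1 ++ t.drop (start + 1) := by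
        conv_lhs => rw [← List.take_append_drop 1 (t.drop start)]
        rw [List.drop_drop]
      conv_rhs => rw [hsplit]
      rw [List.append_assoc]
    · rw [List.drop_eq_nil_of_le (by omega), List.append_nil]

-- When no occurrence lies in [start, k), A copies those k - start chars one by one and arrives at k.
lemma pvLoopA_skip (e mayus t : List Char) (k : Nat) :
    ∀ f start acc, start ≤ k → k ≤ t.length → (∀ j, start ≤ j → j < k → ¬ e <+: t.drop j) →
      k - start ≤ f →
      pvLoopA e mayus t f start acc
        = pvLoopA e mayus t (f - (k - start)) k (acc ++ (t.drop start).take (k - start)) := by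
  intro f
  induction f with
  | zero =>
    intro start acc h1 h2 _ hf
    have : k = start := by omega
    simp [this]
  | succ f ih =>
    intro start acc h1 h2 hno hf
    rcases Nat.eq_or_lt_of_le h1 with heq | hlt
    · simp [heq]
    · rw [pvLoopA, if_pos (by omega)]
      rw [if_neg (by rw [pvMatch_iff]; exact hno start le_rfl hlt)]
      rw [ih (start + 1) _ (by omega) h2 (fun j hj hj' => hno j (by omega) hj') (by omega)]
      have harith : f + 1 - (k - start) = f - (k - (start + 1)) := by omega
      have hchunk : (t.drop start).take (k - start)
          = (t.drop start).take 1 ++ (t.drop (start + 1)).take (k - (start + 1)) := by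
        have h4 : k - start = (k - (start + 1)) + 1 := by omega
        rw [List.drop_eq_getElem_cons (show start < t.length by omega), h4, List.take_succ_cons]
        rfl
      rw [harith, hchunk, List.append_assoc]

-- Main loop equivalence: from any synchronized state the two loops agree.
lemma pvLoop_eq (e mayus t : List Char) (he : e ≠ []) :
    ∀ fB fA start acc, start ≤ t.length → t.length + 1 - start ≤ fA → t.length + 2 - start ≤ fB →
      pvLoopA e mayus t fA start acc = pvLoopB e mayus t fB start acc := by
  intro fB
  induction fB with
  | zero => intro fA start acc h1 _ h3; omega
  | succ fB ih =>
    intro fA start acc hstart hfA hfB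
    simp only [pvLoopB]
    by_cases hidx : PySem.Chars.findFrom t e (start : Int) none = -1
    · rw [if_pos hidx]
      have hnoinf : ¬ e <:+: t.drop start :=
        (PySem.Chars.findFrom_natCast_eq_neg_one_iff t e start hstart).mp hidx
      apply pvLoopA_none
      · intro j hj hpre
        apply hnoinf
        have : e <+: (t.drop start).drop (j - start) := by
          rw [List.drop_drop]
          have : start + (j - start) = j := by omega
          rw [this]; exact hpre
        exact this.isInfix.trans (List.drop_suffix _ _).isInfix
      · omega
    · rw [if_neg hidx]
      obtain ⟨hge, hpre, hmin⟩ := PySem.Chars.findFrom_natCast_spec t e start hstart hidx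
      set idx := PySem.Chars.findFrom t e (start : Int) none with hidxdef
      have hidx0 : 0 ≤ idx := le_trans (by exact_mod_cast Int.natCast_nonneg start) hge
      have hk : start ≤ idx.toNat := (Int.le_toNat hidx0).mpr hge
      have hel : 0 < e.length := List.length_pos_of_ne_nil he
      have hklen : idx.toNat + e.length ≤ t.length := by
        have := hpre.length_le
        rw [List.length_drop] at this
        omega
      have hklt : idx.toNat < t.length := by omega
      rw [pvLoopA_skip e mayus t idx.toNat fA start acc hk (by omega) hmin (by omega)]
      obtain ⟨g, hg⟩ : ∃ g, fA - (idx.toNat - start) = g + 1 :=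
        ⟨fA - (idx.toNat - start) - 1, by omega⟩
      rw [hg, pvLoopA, if_pos (by omega), if_pos ((pvMatch_iff e t idx.toNat).mpr hpre)]
      exact ih g (idx.toNat + e.length) _ (by omega) (by omega) (by omega)

lemma pvToList_ne_nil (s : String) (h : s ≠ "") : s.toList ≠ [] := by
  intro hc
  apply h
  have := congrArg String.ofList hc
  simpa using this

-- ===== VERDICT (by name: the statement is the Claim_ definition above) =====
theorem notreplace_spec : Claim_equal_notreplace := by
  intro emoji significado texto _ hpre
  unfold Spec_notreplace notreplace notreplace_alt
  congr 1
  exact pvLoop_eq _ _ _ (pvToList_ne_nil emoji hpre) _ _ 0 [] (by omega) (by omega) (by omega)
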